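-- pv_equiv track=rewrite | github.com/dankilman/vimgolf | vimgolf/keys.py | parse_raw_keycode_reprs
-- ===== SOURCE A (Python) =====
-- def parse_raw_keycode_reprs(
--         raw_keycode_reprs: str,
--         literal_lt='',
--         literal_gt=''):
--     if literal_lt and literal_gt:
--         assert literal_lt != literal_gt
--     keycodes = []
--     multi_in_progress = False
--     multi_keys = []
--     for raw_keycode_repr in raw_keycode_reprs:
--         if raw_keycode_repr == '<':
--             multi_in_progress = True
--             multi_keys.append(raw_keycode_repr)
--         elif raw_keycode_repr == '>':
--             multi_keys.append(raw_keycode_repr)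
--             multi_in_progress = False
--             keycodes.append(''.join(multi_keys))
--             multi_keys = []
--         elif multi_in_progress:
--             multi_keys.append(raw_keycode_repr)
--         elif literal_lt and raw_keycode_repr == literal_lt:
--             keycodes.append('<')
--         elif literal_gt and raw_keycode_repr == literal_gt:
--             keycodes.append('>')
--         else:
--             keycodes.append(raw_keycode_repr)
--     return keycodes
-- ===== SOURCE B (Python) =====
-- def parse_raw_keycode_reprs(
--         raw_keycode_reprs: str,
--         literal_lt='',
--         literal_gt=''):
--     if literal_lt and literal_gt:
--         assert literal_lt != literal_gt
--     s = raw_keycode_reprs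
--     keycodes = []
--     i = 0
--     n = len(s)
--     while i < n:
--         c = s[i]
--         if c == '<':
--             j = s.find('>', i)
--             if j == -1:
--                 break  # unterminated group: remainder is dropped
--             keycodes.append(s[i:j + 1])
--             i = j + 1
--         else:
--             if c == '>':
--                 keycodes.append('>')
--             elif literal_lt and c == literal_lt:
--                 keycodes.append('<')
--             elif literal_gt and c == literal_gt:
--                 keycodes.append('>')
--             else:
--                 keycodes.append(c)
--             i += 1
--     return keycodes
-- ===== Notes on version B (the rewrite author's own statement) =====
-- stated objective: alternative
-- what changed: Replaces A's char-by-char loop with a boolean in-group flag and an accumulator list by an index-based scan that, at each '<', jumps directly to the next '>' via str.find and slices the whole keycode group out in one step (breaking on an unterminated group).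
import Mathlib
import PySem

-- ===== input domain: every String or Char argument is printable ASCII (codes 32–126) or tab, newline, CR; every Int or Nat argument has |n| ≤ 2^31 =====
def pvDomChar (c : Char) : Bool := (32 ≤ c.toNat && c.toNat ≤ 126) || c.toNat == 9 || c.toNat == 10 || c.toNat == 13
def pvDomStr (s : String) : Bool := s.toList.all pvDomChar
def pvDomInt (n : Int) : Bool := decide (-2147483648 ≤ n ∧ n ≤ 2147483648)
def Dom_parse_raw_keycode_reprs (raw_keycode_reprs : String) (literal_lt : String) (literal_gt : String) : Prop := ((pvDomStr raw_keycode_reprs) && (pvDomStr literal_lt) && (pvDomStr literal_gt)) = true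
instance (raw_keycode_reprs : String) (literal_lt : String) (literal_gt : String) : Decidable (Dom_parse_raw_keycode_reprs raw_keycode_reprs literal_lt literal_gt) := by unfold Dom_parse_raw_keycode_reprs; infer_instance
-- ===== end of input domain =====

-- B replaces A's flag-and-accumulator char loop by an index scan that slices each '<…>'
-- group out in one find/slice jump (alternative decomposition, same O(n) cost).

-- ===== PORT A =====
-- one step of A's for-loop; state = (keycodes, multi_in_progress, multi_keys)
def pvAStep (literal_lt literal_gt : String) :
    List String × Bool × List Char → Char → List String × Bool × List Char
  | (keycodes, multi_in_progress, multi_keys), c =>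
    if c = '<' then
      (keycodes, true, multi_keys ++ [c])
    else if c = '>' then
      (keycodes ++ [String.mk (multi_keys ++ [c])], false, [])
    else if multi_in_progress then
      (keycodes, multi_in_progress, multi_keys ++ [c])
    else if literal_lt ≠ "" ∧ String.mk [c] = literal_lt then
      (keycodes ++ ["<"], multi_in_progress, multi_keys)
    else if literal_gt ≠ "" ∧ String.mk [c] = literal_gt then
      (keycodes ++ [">"], multi_in_progress, multi_keys)
    else
      (keycodes ++ [String.mk [c]], multi_in_progress, multi_keys)

def parse_raw_keycode_reprs (raw_keycode_reprs : String) (literal_lt : String) (literal_gt : String) : List String :=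
  (raw_keycode_reprs.toList.foldl (pvAStep literal_lt literal_gt) ([], false, [])).1

-- ===== PORT B =====
-- B's index scan as structural recursion over the remaining characters; the
-- 'j = s.find('>', i)' / slice jump becomes takeWhile/dropWhile on the rest.
def pvBGo (literal_lt literal_gt : String) : List Char → List String
  | [] => []
  | c :: rest =>
    if c = '<' then
      -- j = s.find('>', i): pre/post split the rest at the first '>'
      if hpost : rest.dropWhile (· ≠ '>') = [] then
        []  -- j == -1: unterminated group, remainder dropped
      else
        String.mk ('<' :: (rest.takeWhile (· ≠ '>') ++ ['>'])) ::
          pvBGo literal_lt literal_gt (rest.dropWhile (· ≠ '>')).tail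
    else if c = '>' then
      ">" :: pvBGo literal_lt literal_gt rest
    else if literal_lt ≠ "" ∧ String.mk [c] = literal_lt then
      "<" :: pvBGo literal_lt literal_gt rest
    else if literal_gt ≠ "" ∧ String.mk [c] = literal_gt then
      ">" :: pvBGo literal_lt literal_gt rest
    else
      String.mk [c] :: pvBGo literal_lt literal_gt rest
  termination_by cs => cs.length
  decreasing_by
    · have h1 : (rest.dropWhile (· ≠ '>')).length ≤ rest.length :=
        (List.dropWhile_sublist _).length_le
      have h2 : 0 < (rest.dropWhile (· ≠ '>')).length := List.length_pos_iff.mpr hpost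
      simp only [List.length_tail, List.length_cons]
      omega
    all_goals simp

def parse_raw_keycode_reprs_alt (raw_keycode_reprs : String) (literal_lt : String) (literal_gt : String) : List String :=
  pvBGo literal_lt literal_gt raw_keycode_reprs.toList

-- ===== PRECONDITION & SPEC =====
-- Pre_ excludes exactly the inputs on which A raises AssertionError
-- (literal_lt and literal_gt both non-empty and equal).
def Pre_parse_raw_keycode_reprs (raw_keycode_reprs : String) (literal_lt : String) (literal_gt : String) : Prop :=
  literal_lt = "" ∨ literal_gt = "" ∨ literal_lt ≠ literal_gt
instance (raw_keycode_reprs : String) (literal_lt : String) (literal_gt : String) : Decidable (Pre_parse_raw_keycode_reprs raw_keycode_reprs literal_lt literal_gt) := by unfold Pre_parse_raw_keycode_reprs; infer_instance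

def pvWitness_parse_raw_keycode_reprs : String × String × String := ("a<Esc>x", "(", ")")

def Spec_parse_raw_keycode_reprs (raw_keycode_reprs : String) (literal_lt : String) (literal_gt : String) (out : List String) : Prop := out = parse_raw_keycode_reprs_alt raw_keycode_reprs literal_lt literal_gt
instance (raw_keycode_reprs : String) (literal_lt : String) (literal_gt : String) (out : List String) : Decidable (Spec_parse_raw_keycode_reprs raw_keycode_reprs literal_lt literal_gt out) := by unfold Spec_parse_raw_keycode_reprs; infer_instance

-- ===== CLAIM (what is proved, stated in full; the proofs are below) =====
def Claim_equal_parse_raw_keycode_reprs : Prop := ∀ (raw_keycode_reprs : String) (literal_lt : String) (literal_gt : String), Dom_parse_raw_keycode_reprs raw_keycode_reprs literal_lt literal_gt → Pre_parse_raw_keycode_reprs raw_keycode_reprs literal_lt literal_gt → Spec_parse_raw_keycode_reprs raw_keycode_reprs literal_lt literal_gt (parse_raw_keycode_reprs raw_keycode_reprs literal_lt literal_gt)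

-- ===== LEMMAS AND PROOFS =====

-- result of A's loop when a group (contents mk) is in progress, phrased via pvBGo
def pvGroupRes (lt gt : String) (acc : List String) (mk : List Char) (cs : List Char) : List String :=
  if cs.dropWhile (· ≠ '>') = [] then acc
  else acc ++ String.mk (mk ++ (cs.takeWhile (· ≠ '>') ++ ['>'])) ::
    pvBGo lt gt (cs.dropWhile (· ≠ '>')).tail

-- the joint invariant of A's fold, by induction on a length bound
theorem pvMain (lt gt : String) : ∀ (n : Nat) (cs : List Char), cs.length ≤ n →
    (∀ acc, (cs.foldl (pvAStep lt gt) (acc, false, [])).1 = acc ++ pvBGo lt gt cs) ∧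
    (∀ acc mk, (cs.foldl (pvAStep lt gt) (acc, true, mk)).1 = pvGroupRes lt gt acc mk cs) := by
  intro n
  induction n with
  | zero =>
    intro cs hlen
    have : cs = [] := List.length_eq_zero_iff.mp (Nat.le_zero.mp hlen)
    subst this
    exact ⟨fun acc => by simp [pvBGo], fun acc mk => by simp [pvGroupRes]⟩
  | succ n ih =>
    intro cs hlen
    cases cs with
    | nil =>
      exact ⟨fun acc => by simp [pvBGo], fun acc mk => by simp [pvGroupRes]⟩
    | cons c rest =>
      have hr : rest.length ≤ n := by simpa using Nat.lt_succ_iff.mp (by simpa using hlen)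
      constructor
      · -- not in a group, multi_keys empty
        intro acc
        by_cases h1 : c = '<'
        · subst h1
          rw [List.foldl_cons,
            show pvAStep lt gt (acc, false, []) '<' = (acc, true, ['<']) from by simp [pvAStep],
            (ih rest hr).2 acc ['<']]
          unfold pvGroupRes
          simp only [pvBGo]
          split <;> simp
        · by_cases h2 : c = '>'
          · subst h2
            rw [List.foldl_cons,
              show pvAStep lt gt (acc, false, []) '>' = (acc ++ [">"], false, []) from by
                simp [pvAStep]; rfl,
              (ih rest hr).1]
            simp [pvBGo]
          · have hA : pvAStep lt gt (acc, false, []) c =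
                (if lt ≠ "" ∧ String.mk [c] = lt then (acc ++ ["<"], false, ([] : List Char))
                 else if gt ≠ "" ∧ String.mk [c] = gt then (acc ++ [">"], false, [])
                 else (acc ++ [String.mk [c]], false, [])) := by
              simp only [pvAStep]
              rw [if_neg h1, if_neg h2, if_neg (show ¬(false = true) from by simp)]
            have hB : pvBGo lt gt (c :: rest) =
                (if lt ≠ "" ∧ String.mk [c] = lt then "<" :: pvBGo lt gt rest
                 else if gt ≠ "" ∧ String.mk [c] = gt then ">" :: pvBGo lt gt rest
                 else String.mk [c] :: pvBGo lt gt rest) := by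
              simp only [pvBGo]
              rw [if_neg h1, if_neg h2]
            rw [List.foldl_cons, hA, hB]
            by_cases h3 : lt ≠ "" ∧ String.mk [c] = lt
            · rw [if_pos h3, if_pos h3, (ih rest hr).1]; simp
            · rw [if_neg h3, if_neg h3]
              by_cases h4 : gt ≠ "" ∧ String.mk [c] = gt
              · rw [if_pos h4, if_pos h4, (ih rest hr).1]; simp
              · rw [if_neg h4, if_neg h4, (ih rest hr).1]; simp
      · -- inside a group with accumulated multi_keys mk
        intro acc mk
        by_cases h2 : c = '>'
        · subst h2
          rw [List.foldl_cons,
            show pvAStep lt gt (acc, true, mk) '>' = (acc ++ [String.mk (mk ++ ['>'])], false, []) from by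
              simp [pvAStep],
            (ih rest hr).1]
          unfold pvGroupRes
          rw [List.dropWhile_cons_of_neg (by simp), List.takeWhile_cons_of_neg (by simp)]
          simp
        · have hstep : pvAStep lt gt (acc, true, mk) c = (acc, true, mk ++ [c]) := by
            by_cases h1 : c = '<'
            · subst h1; simp [pvAStep]
            · simp only [pvAStep]
              rw [if_neg h1, if_neg h2]
              simp
          rw [List.foldl_cons, hstep, (ih rest hr).2 acc (mk ++ [c])]
          unfold pvGroupRes
          rw [List.dropWhile_cons_of_pos (by simpa using h2),
            List.takeWhile_cons_of_pos (by simpa using h2)]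
          by_cases h : rest.dropWhile (· ≠ '>') = []
          · rw [if_pos h, if_pos h]
          · rw [if_neg h, if_neg h]; simp

-- ===== VERDICT (by name: the statement is the Claim_ definition above) =====
theorem parse_raw_keycode_reprs_spec : Claim_equal_parse_raw_keycode_reprs := by
  intro s lt gt _ _
  unfold Spec_parse_raw_keycode_reprs parse_raw_keycode_reprs parse_raw_keycode_reprs_alt
  rw [(pvMain lt gt s.toList.length s.toList le_rfl).1 []]
  simp
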